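-- pv_equiv track=rewrite | github.com/PaletotCode/Compliance-Gate | src/compliance_gate/Engine/rulesets/migration.py | _max_severity
-- ===== SOURCE A (Python) =====
-- from collections.abc import Sequence
--
-- def _max_severity(values: Sequence[str]) -> str:
--     rank = {"DANGER": 4, "WARNING": 3, "INFO": 2, "SUCCESS": 1, "UNKNOWN": 0}
--     best = "UNKNOWN"
--     for value in values:
--         normalized = value.strip().upper()
--         if rank.get(normalized, 0) > rank.get(best, 0):
--             best = normalized
--     return best
-- ===== SOURCE B (Python) =====
-- def _max_severity(values):
--     seen = {value.strip().upper() for value in values}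
--     for level in ("DANGER", "WARNING", "INFO", "SUCCESS"):
--         if level in seen:
--             return level
--     return "UNKNOWN"
-- ===== Notes on version B (the rewrite author's own statement) =====
-- stated objective: idiomatic
-- what changed: Replaces the running-maximum-by-rank scan (dict of ranks, mutable best) with a one-shot set of normalized values checked against a fixed priority list from highest to lowest.
import Mathlib
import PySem

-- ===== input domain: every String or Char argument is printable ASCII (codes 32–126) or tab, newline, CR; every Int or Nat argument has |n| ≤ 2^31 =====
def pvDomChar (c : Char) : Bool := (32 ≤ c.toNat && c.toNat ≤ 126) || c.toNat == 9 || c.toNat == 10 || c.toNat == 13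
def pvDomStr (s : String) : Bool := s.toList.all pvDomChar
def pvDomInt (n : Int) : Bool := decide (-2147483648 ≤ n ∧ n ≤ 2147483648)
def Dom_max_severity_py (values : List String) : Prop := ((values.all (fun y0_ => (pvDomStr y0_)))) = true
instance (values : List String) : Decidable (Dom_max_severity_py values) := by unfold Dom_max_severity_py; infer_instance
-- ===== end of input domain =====

-- B replaces A's running-maximum-by-rank scan with a set of normalized values probed in fixed priority order (idiomatic restructuring, same cost).


-- ===== PORT A =====
-- literal port of A: rank dict, then a fold keeping the best-so-far severity string
def max_severity_py (values : List String) : String :=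
  let rank : PySem.Dict String Int :=
    PySem.Dict.ofList [("DANGER", 4), ("WARNING", 3), ("INFO", 2), ("SUCCESS", 1), ("UNKNOWN", 0)]
  values.foldl (fun best value =>
    let normalized := PySem.Str.upper (PySem.Str.strip value)
    if rank.getD normalized 0 > rank.getD best 0 then normalized else best) "UNKNOWN"

-- ===== PORT B =====
-- literal port of B: one-shot set of normalized values, then the fixed priority loop (unrolled)
def max_severity_py_alt (values : List String) : String :=
  let seen : PySem.Set String :=
    PySem.Set.ofList (values.map (fun value => PySem.Str.upper (PySem.Str.strip value)))
  if PySem.Set.contains seen "DANGER" then "DANGER"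
  else if PySem.Set.contains seen "WARNING" then "WARNING"
  else if PySem.Set.contains seen "INFO" then "INFO"
  else if PySem.Set.contains seen "SUCCESS" then "SUCCESS"
  else "UNKNOWN"

-- ===== PRECONDITION & SPEC =====
def Spec_max_severity_py (values : List String) (out : String) : Prop := out = max_severity_py_alt values
instance (values : List String) (out : String) : Decidable (Spec_max_severity_py values out) := by unfold Spec_max_severity_py; infer_instance

-- ===== CLAIM (what is proved, stated in full; the proofs are below) =====
def Claim_equal_max_severity_py : Prop := ∀ (values : List String), Dom_max_severity_py values → Spec_max_severity_py values (max_severity_py values)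

-- ===== LEMMAS AND PROOFS =====

-- the rank function A's dict lookup computes
def pvRank (s : String) : Int :=
  if s = "DANGER" then 4 else if s = "WARNING" then 3 else if s = "INFO" then 2
  else if s = "SUCCESS" then 1 else 0

-- pick the argument of larger rank (ties go to the second argument) — A's update step
def pvStep (x y : String) : String := if pvRank x > pvRank y then x else y

-- B's priority chain as a function of the normalized list
def pvChain (l : List String) : String :=
  if "DANGER" ∈ l then "DANGER"
  else if "WARNING" ∈ l then "WARNING"
  else if "INFO" ∈ l then "INFO"
  else if "SUCCESS" ∈ l then "SUCCESS"
  else "UNKNOWN"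

lemma pvRank_nonneg (s : String) : 0 ≤ pvRank s := by
  unfold pvRank; split_ifs <;> omega

lemma pvRank_pos_inj {s t : String} (hs : 0 < pvRank s) (h : pvRank s = pvRank t) : s = t := by
  unfold pvRank at *; split_ifs at * <;> first | omega | (subst_vars; rfl)

lemma pvClass (a : String) : a = "DANGER" ∨ a = "WARNING" ∨ a = "INFO" ∨ a = "SUCCESS" ∨
    (pvRank a = 0 ∧ "DANGER" ≠ a ∧ "WARNING" ≠ a ∧ "INFO" ≠ a ∧ "SUCCESS" ≠ a) := by
  unfold pvRank; split_ifs <;> simp_all [eq_comm]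

lemma rank_getD (s : String) :
    (PySem.Dict.ofList [("DANGER", (4:Int)), ("WARNING", 3), ("INFO", 2), ("SUCCESS", 1), ("UNKNOWN", 0)]).getD s 0
      = pvRank s := by
  by_cases h5 : "UNKNOWN" = s
  · subst h5; rfl
  · rcases pvClass s with h|h|h|h|⟨h0, h1, h2, h3, h4⟩
    · subst h; rfl
    · subst h; rfl
    · subst h; rfl
    · subst h; rfl
    · rw [h0]
      simp [pysem, PySem.Dict.ofList, PySem.Dict.update, List.foldl, PySem.Dict.getD_insert,
        h1.symm, h2.symm, h3.symm, h4.symm, (show s ≠ "UNKNOWN" from fun h => h5 h.symm)]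

lemma pvStep_assoc (x y z : String) : pvStep z (pvStep x y) = pvStep (pvStep x z) y := by
  have hx := pvRank_nonneg x; have hy := pvRank_nonneg y; have hz := pvRank_nonneg z
  unfold pvStep
  split_ifs <;> first | rfl | omega | exact pvRank_pos_inj (by omega) (by omega)

lemma pvChain_cons (a : String) (l : List String) : pvChain (a :: l) = pvStep a (pvChain l) := by
  rcases pvClass a with h|h|h|h|⟨h0, hn1, hn2, hn3, hn4⟩ <;> subst_vars <;>
    by_cases h1 : "DANGER" ∈ l <;> by_cases h2 : "WARNING" ∈ l <;>
    by_cases h3 : "INFO" ∈ l <;> by_cases h4 : "SUCCESS" ∈ l <;>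
    simp_all [pvChain, pvStep, pvRank, List.mem_cons]

lemma pvChain_cases (l : List String) :
    pvChain l = "DANGER" ∨ pvChain l = "WARNING" ∨ pvChain l = "INFO" ∨
    pvChain l = "SUCCESS" ∨ pvChain l = "UNKNOWN" := by
  unfold pvChain; split_ifs <;> simp

lemma pvStep_chain_unknown (l : List String) : pvStep (pvChain l) "UNKNOWN" = pvChain l := by
  rcases pvChain_cases l with h|h|h|h|h <;> rw [h] <;> rfl

lemma foldl_eq_step_chain (l : List String) (b : String) :
    l.foldl (fun best n => if pvRank n > pvRank best then n else best) b
      = pvStep (pvChain l) b := by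
  induction l generalizing b with
  | nil =>
    have := pvRank_nonneg b
    unfold pvChain pvStep
    simp only [List.foldl_nil, List.not_mem_nil, if_false]
    rw [show pvRank "UNKNOWN" = 0 from rfl, if_neg (by omega)]
  | cons a l ih =>
    rw [List.foldl_cons, ih, pvChain_cons]
    have h : (if pvRank a > pvRank b then a else b) = pvStep a b := rfl
    rw [h, pvStep_assoc]

-- ===== VERDICT (by name: the statement is the Claim_ definition above) =====
theorem max_severity_py_spec : Claim_equal_max_severity_py := by
  intro values _
  unfold Spec_max_severity_py max_severity_py max_severity_py_alt
  have hA := foldl_eq_step_chain (values.map (fun v => PySem.Str.upper (PySem.Str.strip v))) "UNKNOWN"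
  rw [List.foldl_map, pvStep_chain_unknown] at hA
  simp only [rank_getD]
  rw [hA]
  unfold pvChain
  simp [PySem.Set.mem_ofList]
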